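-- pv_equiv track=rewrite | github.com/dhawal9035/Advanced-Data-Structure-and-Algorithms-Implementations | Print Neatly/print_neatly.py | determine_text
-- ===== SOURCE A (Python) =====
-- def determine_text(word_length, word_index, words):
--     x = word_length-1
--     y = word_index[-1] - 1
--     z = y + 1
--     textlist = []
--     text = ''
--     textlist.append(words[int(z-1):x+1])
--     while y >= 1:
--         textlist.append(words[int(word_index[y]-1):int(y)])
--         y = word_index[y] - 1
--     for i in range(len(textlist)-1, -1, -1):
--         text += " ".join(str(y) for y in textlist[i])
--         text += "\n"
--     text = text[:-1]
--     return text
-- ===== SOURCE B (Python) =====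
-- def determine_text(word_length, word_index, words):
--     # Classic recursive backtrace reconstruction: recurse on the previous break
--     # first, so lines come out in forward order; join with '\n' at the end.
--     def lines(end):
--         if end < 1:
--             return []
--         start = word_index[end] - 1
--         return lines(start) + [" ".join(str(w) for w in words[start:end])]
--     last = word_index[-1] - 1
--     return "\n".join(lines(last) + [" ".join(str(w) for w in words[last:word_length])])
-- ===== Notes on version B (the rewrite author's own statement) =====
-- stated objective: simpler
-- what changed: B replaces A's iterative backward build (list of slices, reversed index loop, trailing-newline trim) by the classic recursive backtrace reconstruction: a recursive helper emits earlier lines first, and the lines are joined with '\n'.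
import Mathlib
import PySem

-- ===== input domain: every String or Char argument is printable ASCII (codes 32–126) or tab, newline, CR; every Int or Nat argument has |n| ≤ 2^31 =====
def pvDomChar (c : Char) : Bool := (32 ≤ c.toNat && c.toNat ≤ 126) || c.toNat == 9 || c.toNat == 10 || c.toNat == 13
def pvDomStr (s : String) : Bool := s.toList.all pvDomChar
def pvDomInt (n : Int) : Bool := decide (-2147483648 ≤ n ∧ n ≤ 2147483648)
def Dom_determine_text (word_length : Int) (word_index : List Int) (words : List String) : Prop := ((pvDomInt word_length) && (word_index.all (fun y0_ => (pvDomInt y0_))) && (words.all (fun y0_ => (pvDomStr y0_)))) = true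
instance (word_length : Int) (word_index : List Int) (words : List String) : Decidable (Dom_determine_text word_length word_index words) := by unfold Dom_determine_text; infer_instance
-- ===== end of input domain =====

-- B reconstructs the lines by recursive backtrace (earlier lines first) and a final '\n'-join, replacing A's backward list build, reversed index loop and trailing-newline trim; objective: simpler.


-- ===== PORT A =====
-- the 'while y >= 1' loop; fuel = word_index.length suffices under Pre_ (the walk ends within that many steps)
def dtTextLoop (word_index : List Int) (words : List String) : Nat → Int → List (List String) → List (List String)
  | 0, _, textlist => textlist
  | fuel+1, y, textlist =>
    if 1 ≤ y then
      dtTextLoop word_index words fuel (PySem.List.pyGetD word_index y 0 - 1)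
        (textlist ++ [PySem.List.slice words (some (PySem.List.pyGetD word_index y 0 - 1)) (some y)])
    else textlist

-- str(w) on a str is the identity, so '" ".join(str(w) for w in l)' is PySem.Str.join " " l
def determine_text (word_length : Int) (word_index : List Int) (words : List String) : String :=
  let x := word_length - 1
  let y := PySem.List.pyGetD word_index (-1) 0 - 1   -- word_index[-1]: IndexError on [] is excluded by Pre_
  let z := y + 1
  let textlist := dtTextLoop word_index words word_index.length y
      [PySem.List.slice words (some (z - 1)) (some (x + 1))]
  let text := (PySem.List.pyRange (PySem.List.len textlist - 1) (-1) (-1)).foldl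
      (fun t i => (t ++ (PySem.Str.join " " (PySem.List.pyGetD textlist i [])).toList) ++ ['\n']) ([] : List Char)
  String.ofList (PySem.List.slice text none (some (-1)))   -- text[:-1]

-- ===== PORT B =====
-- B's recursive helper 'lines(end)': recurse on the previous break first, then emit this line;
-- fuel = word_index.length bounds the recursion depth (enough under Pre_)
def dtAltLines (word_index : List Int) (words : List String) : Nat → Int → List String
  | 0, _ => []
  | fuel+1, e =>
    if 1 ≤ e then
      let start := PySem.List.pyGetD word_index e 0 - 1
      dtAltLines word_index words fuel start ++
        [PySem.Str.join " " (PySem.List.slice words (some start) (some e))]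
    else []

def determine_text_alt (word_length : Int) (word_index : List Int) (words : List String) : String :=
  let last := PySem.List.pyGetD word_index (-1) 0 - 1
  PySem.Str.join "\n"
    (dtAltLines word_index words word_index.length last ++
      [PySem.Str.join " " (PySem.List.slice words (some last) (some word_length))])

-- ===== PRECONDITION & SPEC =====
-- one step of the backtrace successor map of word_index (identity off the walkable range [1, len))
def dtStep (word_index : List Int) (y : Int) : Int :=
  if 1 ≤ y ∧ y < (word_index.length : Int) then word_index.getD y.toNat 0 - 1 else y

-- Pre_ holds on EXACTLY the inputs where Python A returns: word_index nonempty (else word_index[-1]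
-- raises IndexError) and, viewing word_index as a successor table, the chain from word_index[-1]-1
-- reaches below 1 (else A raises IndexError at an out-of-range word_index[y], where dtStep sticks,
-- or the while loop cycles forever); by pigeonhole a terminating chain has at most
-- word_index.length steps, so the bounded ∃ is exact.
def Pre_determine_text (word_length : Int) (word_index : List Int) (words : List String) : Prop :=
  word_index ≠ [] ∧
    ∃ k < word_index.length + 1,
      (dtStep word_index)^[k] (word_index.getD (word_index.length - 1) 0 - 1) < 1
instance (word_length : Int) (word_index : List Int) (words : List String) : Decidable (Pre_determine_text word_length word_index words) := by unfold Pre_determine_text; infer_instance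

def pvWitness_determine_text : Int × List Int × List String := (3, [1, 1, 2], ["a", "bb", "c"])

def Spec_determine_text (word_length : Int) (word_index : List Int) (words : List String) (out : String) : Prop := out = determine_text_alt word_length word_index words
instance (word_length : Int) (word_index : List Int) (words : List String) (out : String) : Decidable (Spec_determine_text word_length word_index words out) := by unfold Spec_determine_text; infer_instance

-- ===== CLAIM (what is proved, stated in full; the proofs are below) =====
def Claim_equal_determine_text : Prop := ∀ (word_length : Int) (word_index : List Int) (words : List String), Dom_determine_text word_length word_index words → Pre_determine_text word_length word_index words → Spec_determine_text word_length word_index words (determine_text word_length word_index words)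

-- ===== LEMMAS AND PROOFS =====

-- the word slices of the lines A's while loop visits, in visiting (reverse-text) order
def dtChain (word_index : List Int) (words : List String) : Nat → Int → List (List String)
  | 0, _ => []
  | fuel+1, y =>
    if 1 ≤ y then
      PySem.List.slice words (some (PySem.List.pyGetD word_index y 0 - 1)) (some y)
        :: dtChain word_index words fuel (PySem.List.pyGetD word_index y 0 - 1)
    else []

-- one finished line: joined words plus the newline A appends after every line
def lineF (l : List String) : List Char := (PySem.Str.join " " l).toList ++ ['\n']

theorem dtTextLoop_eq (wi : List Int) (ws : List String) :
    ∀ (fuel : Nat) (y : Int) (acc : List (List String)),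
      dtTextLoop wi ws fuel y acc = acc ++ dtChain wi ws fuel y := by
  intro fuel
  induction fuel with
  | zero => intro y acc; simp [dtTextLoop, dtChain]
  | succ n ih =>
    intro y acc
    simp only [dtTextLoop, dtChain]
    split
    · rw [ih]; simp
    · simp

theorem dtAltLines_eq (wi : List Int) (ws : List String) :
    ∀ (fuel : Nat) (y : Int),
      dtAltLines wi ws fuel y = ((dtChain wi ws fuel y).map (PySem.Str.join " ")).reverse := by
  intro fuel
  induction fuel with
  | zero => intro y; simp [dtAltLines, dtChain]
  | succ n ih =>
    intro y
    simp only [dtAltLines, dtChain]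
    split
    · rw [ih]; simp
    · simp

theorem foldA_eq (tl : List (List String)) :
    (PySem.List.pyRange (PySem.List.len tl - 1) (-1) (-1)).foldl
      (fun t i => (t ++ (PySem.Str.join " " (PySem.List.pyGetD tl i [])).toList) ++ ['\n']) ([] : List Char)
    = (tl.reverse.map lineF).flatten := by
  have hr : PySem.List.pyRange (PySem.List.len tl - 1) (-1) (-1)
      = (PySem.List.pyRange 0 ((tl.length : Int)) 1).reverse := by
    rw [PySem.List.pyRange_neg_one_eq_reverse]
    norm_num [PySem.List.len_eq]
  have hbody : (fun (t : List Char) (i : Int) =>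
        (t ++ (PySem.Str.join " " (PySem.List.pyGetD tl i [])).toList) ++ ['\n'])
      = fun t i => t ++ lineF (PySem.List.pyGetD tl i []) := by
    funext t i; simp [lineF]
  have hmap : (PySem.List.pyRange 0 ((tl.length : Int)) 1).map
        (fun i => lineF (PySem.List.pyGetD tl i [])) = tl.map lineF := by
    calc (PySem.List.pyRange 0 ((tl.length : Int)) 1).map
          (fun i => lineF (PySem.List.pyGetD tl i []))
        = ((PySem.List.pyRange 0 ((tl.length : Int)) 1).map
            (fun i => PySem.List.pyGetD tl i [])).map lineF := by
          rw [List.map_map]; rfl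
      _ = tl.map lineF := by
          rw [PySem.List.map_pyGetD_pyRange_zero' (xs := tl) (d := ([] : List String))]
  rw [hr, hbody, PySem.List.foldl_append_eq_flatMap, List.nil_append, List.flatMap_def,
    List.map_reverse, hmap, List.map_reverse]

-- '\n'.join of nonempty lines, plus one final newline, equals the concatenation of newline-terminated lines
theorem join_newline (ls : List (List Char)) (h : ls ≠ []) :
    PySem.Chars.join ['\n'] ls ++ ['\n'] = (ls.map (· ++ ['\n'])).flatten := by
  induction ls with
  | nil => exact absurd rfl h
  | cons a t ih =>
    cases t with
    | nil => simp [PySem.Chars.join, List.intercalate]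
    | cons b t' =>
      have hrec := ih (by simp)
      have hstep : (['\n'] : List Char).intercalate (a :: b :: t')
          = a ++ ['\n'] ++ (['\n'] : List Char).intercalate (b :: t') := by
        simp [List.intercalate]
      simp only [PySem.Chars.join] at hrec ⊢
      rw [hstep, List.map_cons, List.flatten_cons, List.append_assoc, List.append_assoc, hrec]
      simp

-- ===== VERDICT (by name: the statement is the Claim_ definition above) =====
theorem determine_text_spec : Claim_equal_determine_text := by
  intro word_length word_index words _ _
  unfold Spec_determine_text determine_text determine_text_alt
  simp only []
  set y0 : Int := PySem.List.pyGetD word_index (-1) 0 - 1 with hy0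
  have hz : y0 + 1 - 1 = y0 := by ring
  have hx : word_length - 1 + 1 = word_length := by ring
  rw [hz, hx, dtTextLoop_eq, dtAltLines_eq, foldA_eq]
  set C := dtChain word_index words word_index.length y0
  set L0 := PySem.List.slice words (some y0) (some word_length)
  have hA : (([L0] ++ C).reverse.map lineF).flatten
      = ((C.reverse.map (PySem.Str.join " ") ++ [PySem.Str.join " " L0]).map
          (fun s => s.toList ++ ['\n'])).flatten := by
    have hl : lineF = fun x => PySem.Chars.join [' '] (x.map String.toList) ++ ['\n'] := by
      funext x
      simp [lineF, PySem.Str.toList_join]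
    rw [hl]
    simp [PySem.Str.toList_join, Function.comp_def]
  have hne : C.reverse.map (PySem.Str.join " ") ++ [PySem.Str.join " " L0] ≠ [] := by simp
  have hB : (PySem.Str.join "\n"
        (C.reverse.map (PySem.Str.join " ") ++ [PySem.Str.join " " L0])).toList ++ ['\n']
      = ((C.reverse.map (PySem.Str.join " ") ++ [PySem.Str.join " " L0]).map
          (fun s => s.toList ++ ['\n'])).flatten := by
    rw [PySem.Str.toList_join]
    have h2 : ("\n" : String).toList = ['\n'] := rfl
    rw [h2, join_newline _ (by simp)]
    simp [List.map_map, Function.comp_def]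
  have hdrop : ((([L0] ++ C).reverse.map lineF).flatten).dropLast
      = (PySem.Str.join "\n"
          (C.reverse.map (PySem.Str.join " ") ++ [PySem.Str.join " " L0])).toList := by
    rw [hA, ← hB, List.dropLast_concat]
  rw [PySem.List.slice_to_neg_one, hdrop, String.ofList_toList]
  simp [List.map_reverse]
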